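-- pv_equiv track=rewrite | github.com/golamshaifullah/pleb | pleb/run_report.py | normalize_report_stages
-- ===== SOURCE A (Python) =====
-- from typing import Any, Mapping, Optional, Sequence
--
-- VALID_REPORT_STAGES = (
--     "summary",
--     "config",
--     "ingest",
--     "fix",
--     "qc",
--     "workflow",
--     "artifacts",
-- )
--
-- def normalize_report_stages(
--     stages: Optional[Sequence[str]],
-- ) -> list[str]:
--     if stages is None:
--         return list(VALID_REPORT_STAGES)
--     out: list[str] = []
--     seen: set[str] = set()
--     for raw in stages:
--         for part in str(raw).split(","):
--             name = part.strip().lower()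
--             if not name or name in seen:
--                 continue
--             if name not in VALID_REPORT_STAGES:
--                 raise ValueError(
--                     "Unknown consolidated report stage "
--                     f"{name!r}. Valid values: {', '.join(VALID_REPORT_STAGES)}"
--                 )
--             out.append(name)
--             seen.add(name)
--     return out
-- ===== SOURCE B (Python) =====
-- from typing import Optional, Sequence
--
-- VALID_REPORT_STAGES = (
--     "summary",
--     "config",
--     "ingest",
--     "fix",
--     "qc",
--     "workflow",
--     "artifacts",
-- )
--
-- def normalize_report_stages(
--     stages: Optional[Sequence[str]],
-- ) -> list[str]:
--     if stages is None:
--         return list(VALID_REPORT_STAGES)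
--     tokens = [
--         p.strip().lower()
--         for raw in stages
--         for p in str(raw).split(",")
--         if p.strip().lower()
--     ]
--     out: list[str] = []
--     for name in list(dict.fromkeys(tokens)):
--         if name not in VALID_REPORT_STAGES:
--             raise ValueError(
--                 "Unknown consolidated report stage "
--                 f"{name!r}. Valid values: {', '.join(VALID_REPORT_STAGES)}"
--             )
--         out.append(name)
--     return out
-- ===== Notes on version B (the rewrite author's own statement) =====
-- stated objective: simpler
-- what changed: Replaces A's nested loops threading an (out, seen) pair with three flat passes: build one normalized non-empty token list, dedup it order-preservingly with dict.fromkeys, then validate (raising A's exact ValueError on the first invalid name).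
import Mathlib
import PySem

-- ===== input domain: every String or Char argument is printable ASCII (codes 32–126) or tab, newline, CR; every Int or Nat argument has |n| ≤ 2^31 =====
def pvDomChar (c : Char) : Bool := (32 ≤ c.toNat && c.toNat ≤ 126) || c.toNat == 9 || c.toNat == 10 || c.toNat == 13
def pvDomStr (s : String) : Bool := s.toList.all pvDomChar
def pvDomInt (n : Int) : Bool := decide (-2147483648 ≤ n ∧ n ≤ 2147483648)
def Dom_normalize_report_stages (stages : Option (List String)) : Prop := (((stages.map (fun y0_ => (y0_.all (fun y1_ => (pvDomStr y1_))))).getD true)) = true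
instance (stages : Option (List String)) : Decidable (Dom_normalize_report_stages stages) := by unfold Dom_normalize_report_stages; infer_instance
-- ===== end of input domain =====

-- B is a simpler multi-pass decomposition: one flat normalized token list, one
-- order-preserving dedup (dict.fromkeys), one validation pass — instead of A's
-- nested loops threading an (out, seen) pair. Return values agree on Pre_
-- (the inputs on which A does not raise).

-- shared constant: VALID_REPORT_STAGES
def pvValid : List String := ["summary", "config", "ingest", "fix", "qc", "workflow", "artifacts"]

-- name = part.strip().lower()
def pvNorm (p : String) : String := PySem.Str.lower (PySem.Str.strip p)

-- raw.split(","): the separator is non-empty, so split? is always some (exact)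
def pvSplit (raw : String) : List String := (PySem.Str.split? raw ",").getD []

-- ===== PORT A =====
-- loop body for one part; the 'name not in VALID_REPORT_STAGES' branch is
-- Python's raise: the port leaves the state unchanged there (outside Pre_).
def pvStepA (st : List String × PySem.Set String) (name : String) : List String × PySem.Set String :=
  if name = "" ∨ PySem.Set.contains st.2 name then st
  else if name ∉ pvValid then st   -- Python: raise ValueError (outside Pre_)
  else (st.1 ++ [name], PySem.Set.add st.2 name)

def normalize_report_stages (stages : Option (List String)) : List String :=
  match stages with
  | none => pvValid
  | some l =>
    (l.foldl (fun st raw => (pvSplit raw).foldl (fun st part => pvStepA st (pvNorm part)) st)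
      ([], PySem.Set.empty)).1

-- ===== PORT B =====
-- the raise in B's validation loop stops the loop: the port returns the list
-- collected so far (outside Pre_).
def pvValidateB : List String → List String
  | [] => []
  | n :: rest => if n ∈ pvValid then n :: pvValidateB rest else []  -- Python: raise (outside Pre_)

def normalize_report_stages_alt (stages : Option (List String)) : List String :=
  match stages with
  | none => pvValid
  | some l =>
    let tokens := ((l.flatMap pvSplit).map pvNorm).filter (· ≠ "")
    pvValidateB (PySem.List.dedup tokens)

-- ===== PRECONDITION & SPEC =====
-- Pre_ excludes exactly the inputs on which A raises ValueError: some normalized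
-- non-empty token is not a valid report stage (B raises the same error there).
def Pre_normalize_report_stages (stages : Option (List String)) : Prop :=
  match stages with
  | none => True
  | some l => ∀ t ∈ (l.flatMap pvSplit).map pvNorm, t = "" ∨ t ∈ pvValid

instance (stages : Option (List String)) : Decidable (Pre_normalize_report_stages stages) := by
  unfold Pre_normalize_report_stages; cases stages <;> infer_instance

def pvWitness_normalize_report_stages : Option (List String) := some [" QC, summary", "qc", ""]

def Spec_normalize_report_stages (stages : Option (List String)) (out : List String) : Prop := out = normalize_report_stages_alt stages
instance (stages : Option (List String)) (out : List String) : Decidable (Spec_normalize_report_stages stages out) := by unfold Spec_normalize_report_stages; infer_instance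

-- ===== CLAIM (what is proved, stated in full; the proofs are below) =====
def Claim_equal_normalize_report_stages : Prop := ∀ (stages : Option (List String)), Dom_normalize_report_stages stages → Pre_normalize_report_stages stages → Spec_normalize_report_stages stages (normalize_report_stages stages)

-- ===== LEMMAS AND PROOFS =====

-- flatten A's nested foldl into one foldl over the flatMap of the parts
theorem pv_foldl_nest {α β γ : Type} (P : β → List γ) (g : α → γ → α) :
    ∀ (l : List β) (init : α),
      l.foldl (fun st raw => (P raw).foldl g st) init = (l.flatMap P).foldl g init := by
  intro l
  induction l with
  | nil => intro init; rfl
  | cons x xs ih => intro init; simp [List.flatMap_cons, List.foldl_append, ih]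

-- A's (out, seen) loop over an already-normalized token list computes
-- PySem.Set.update out (filtered tokens) when seen = out and every non-empty
-- token is valid.
theorem pv_loopA_eq_update (ts : List String) :
    ∀ (out : List String), (∀ t ∈ ts, t = "" ∨ t ∈ pvValid) →
      (ts.foldl pvStepA (out, out)).1 = PySem.Set.update out (ts.filter (· ≠ "")) := by
  induction ts with
  | nil => intro out _; simp [PySem.Set.update]
  | cons t ts ih =>
    intro out h
    have hrest : ∀ x ∈ ts, x = "" ∨ x ∈ pvValid := fun x hx => h x (List.mem_cons_of_mem _ hx)
    have ht := h t (List.mem_cons_self)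
    rw [List.foldl_cons, List.filter_cons]
    by_cases he : t = ""
    · subst he
      rw [if_neg (by simp)]
      rw [show pvStepA (out, out) "" = (out, out) by simp [pvStepA]]
      exact ih out hrest
    · have hv : t ∈ pvValid := ht.resolve_left he
      rw [if_pos (by simp [he])]
      by_cases hm : t ∈ out
      · have hc : PySem.Set.contains out t = true := by simp [PySem.Set.contains, hm]
        rw [show pvStepA (out, out) t = (out, out) by simp [pvStepA, hm]]
        rw [show PySem.Set.update out (t :: ts.filter (· ≠ "")) = PySem.Set.update out (ts.filter (· ≠ "")) by
          simp [PySem.Set.update, PySem.Set.add, PySem.Set.contains, hm]]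
        exact ih out hrest
      · have hadd : PySem.Set.add out t = out ++ [t] := by
          simp [PySem.Set.add, PySem.Set.contains, hm]
        rw [show pvStepA (out, out) t = (out ++ [t], out ++ [t]) by
          simp [pvStepA, PySem.Set.contains, hm, he, hv]]
        rw [show PySem.Set.update out (t :: ts.filter (· ≠ "")) = PySem.Set.update (out ++ [t]) (ts.filter (· ≠ "")) by
          simp [PySem.Set.update, hadd]]
        exact ih (out ++ [t]) hrest

-- B's validation pass is the identity when every name is valid
theorem pv_validateB_id (ns : List String) (h : ∀ n ∈ ns, n ∈ pvValid) :
    pvValidateB ns = ns := by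
  induction ns with
  | nil => rfl
  | cons n ns ih =>
    simp [pvValidateB, h n (by simp), ih (fun x hx => h x (by simp [hx]))]

-- ===== VERDICT (by name: the statement is the Claim_ definition above) =====
theorem normalize_report_stages_spec : Claim_equal_normalize_report_stages := by
  intro stages _ hpre
  unfold Spec_normalize_report_stages
  cases stages with
  | none => rfl
  | some l =>
    unfold normalize_report_stages normalize_report_stages_alt
    unfold Pre_normalize_report_stages at hpre
    simp only
    rw [pv_foldl_nest, ← List.foldl_map]
    have hA := pv_loopA_eq_update ((l.flatMap pvSplit).map pvNorm) [] hpre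
    have hB : pvValidateB (PySem.List.dedup (((l.flatMap pvSplit).map pvNorm).filter (· ≠ "")))
        = PySem.List.dedup (((l.flatMap pvSplit).map pvNorm).filter (· ≠ "")) := by
      apply pv_validateB_id
      intro n hn
      rw [PySem.List.mem_dedup] at hn
      rcases List.mem_filter.mp hn with ⟨hmem, hne⟩
      exact (hpre n hmem).resolve_left (by simpa using hne)
    rw [show (PySem.Set.empty : PySem.Set String) = ([] : List String) from rfl, hA, hB]
    simp [PySem.List.dedup_eq_ofList, PySem.Set.ofList_eq_foldl, PySem.Set.update]
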